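-- pv_equiv track=rewrite | github.com/R3coNYT/Centralized | parsers/ai_scan_parser.py | _extract_final_report
-- ===== SOURCE A (Python) =====
-- def _extract_final_report(turns: list) -> str:
--     for turn in reversed(turns):
--         if turn.get("status") == "complete" and turn.get("final_report"):
--             return turn["final_report"]
--         if turn.get("final_report"):
--             return turn["final_report"]
--     for turn in reversed(turns):
--         if turn.get("analysis"):
--             return turn["analysis"]
--     return ""
-- ===== SOURCE B (Python) =====
-- def _extract_final_report(turns: list) -> str:
--     fr = None
--     an = None
--     for turn in reversed(turns):
--         if fr is None and turn.get("final_report"):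
--             fr = turn["final_report"]
--         if an is None and turn.get("analysis"):
--             an = turn["analysis"]
--     if fr:
--         return fr
--     if an:
--         return an
--     return ""
-- ===== Notes on version B (the rewrite author's own statement) =====
-- stated objective: alternative
-- what changed: replaces A's two separate reverse scans (final_report pass, then analysis pass) with one reverse traversal maintaining two first-seen accumulators and a prioritized return afterwards
import Mathlib
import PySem

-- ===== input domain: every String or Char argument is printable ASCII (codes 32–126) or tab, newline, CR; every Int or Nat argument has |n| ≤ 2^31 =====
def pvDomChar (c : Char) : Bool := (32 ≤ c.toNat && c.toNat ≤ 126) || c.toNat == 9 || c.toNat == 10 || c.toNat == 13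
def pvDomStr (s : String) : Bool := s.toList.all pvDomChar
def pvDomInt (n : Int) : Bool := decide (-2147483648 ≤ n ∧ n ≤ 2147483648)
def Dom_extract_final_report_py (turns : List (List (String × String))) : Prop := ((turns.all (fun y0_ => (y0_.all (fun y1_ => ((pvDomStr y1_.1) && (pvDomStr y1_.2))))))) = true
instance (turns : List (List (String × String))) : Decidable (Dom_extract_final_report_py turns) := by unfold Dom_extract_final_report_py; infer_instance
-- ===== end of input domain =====

-- B replaces A's two separate reverse scans by ONE reverse pass with two first-seen
-- accumulators and a prioritized return (objective: alternative decomposition).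

-- ===== PORT A =====
-- shared dict.get: first match in the association list (insertion-order lookup)
def pvGetS (t : List (String × String)) (k : String) : Option String :=
  (t.find? (fun p => p.1 == k)).map (·.2)

-- A's first loop: for turn in reversed(turns): two if/return branches
def pvALoop1 : List (List (String × String)) → Option String
  | [] => none
  | t :: rest =>
    if pvGetS t "status" = some "complete" ∧ pvGetS t "final_report" ≠ some "" ∧ pvGetS t "final_report" ≠ none then
      pvGetS t "final_report"
    else if pvGetS t "final_report" ≠ some "" ∧ pvGetS t "final_report" ≠ none then
      pvGetS t "final_report"
    else pvALoop1 rest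

-- A's second loop: for turn in reversed(turns): if analysis truthy, return it
def pvALoop2 : List (List (String × String)) → Option String
  | [] => none
  | t :: rest =>
    if pvGetS t "analysis" ≠ some "" ∧ pvGetS t "analysis" ≠ none then
      pvGetS t "analysis"
    else pvALoop2 rest

def extract_final_report_py (turns : List (List (String × String))) : String :=
  match pvALoop1 turns.reverse with
  | some s => s
  | none =>
    match pvALoop2 turns.reverse with
    | some s => s
    | none => ""

-- ===== PORT B =====
-- one reverse pass; state = (first truthy final_report seen, first truthy analysis seen)
def pvBStep (s : Option String × Option String) (t : List (String × String)) :
    Option String × Option String :=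
  let fr := if s.1 = none ∧ pvGetS t "final_report" ≠ some "" ∧ pvGetS t "final_report" ≠ none
            then pvGetS t "final_report" else s.1
  let an := if s.2 = none ∧ pvGetS t "analysis" ≠ some "" ∧ pvGetS t "analysis" ≠ none
            then pvGetS t "analysis" else s.2
  (fr, an)

def extract_final_report_py_alt (turns : List (List (String × String))) : String :=
  let r := turns.reverse.foldl pvBStep (none, none)
  match r.1 with
  | some s => s
  | none =>
    match r.2 with
    | some s => s
    | none => ""

-- ===== PRECONDITION & SPEC =====
def Spec_extract_final_report_py (turns : List (List (String × String))) (out : String) : Prop := out = extract_final_report_py_alt turns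
instance (turns : List (List (String × String))) (out : String) : Decidable (Spec_extract_final_report_py turns out) := by unfold Spec_extract_final_report_py; infer_instance

-- ===== CLAIM (what is proved, stated in full; the proofs are below) =====
def Claim_equal_extract_final_report_py : Prop := ∀ (turns : List (List (String × String))), Dom_extract_final_report_py turns → Spec_extract_final_report_py turns (extract_final_report_py turns)

-- ===== LEMMAS AND PROOFS =====

-- The fold computes componentwise: fr = a.or (first final_report), an = b.or (first analysis)
theorem pvFold_spec (l : List (List (String × String))) :
    ∀ (a b : Option String),
      l.foldl pvBStep (a, b) = (a.or (pvALoop1 l), b.or (pvALoop2 l)) := by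
  induction l with
  | nil => intro a b; simp [pvALoop1, pvALoop2]
  | cons t rest ih =>
    intro a b
    simp only [List.foldl_cons, pvBStep, ih]
    rcases hf : pvGetS t "final_report" with _ | f <;>
      rcases ha : pvGetS t "analysis" with _ | g <;>
        cases a <;> cases b <;>
          simp only [pvALoop1, pvALoop2, hf, ha, Option.or] <;>
            split_ifs <;> simp_all

-- ===== VERDICT (by name: the statement is the Claim_ definition above) =====
theorem extract_final_report_py_spec : Claim_equal_extract_final_report_py := by
  intro turns _
  unfold Spec_extract_final_report_py extract_final_report_py extract_final_report_py_alt
  rw [pvFold_spec]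
  simp [Option.or]
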